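-- pv_equiv track=rewrite | github.com/Natali-Dubotolkova/Python | Dubotolkova_DZ1/Dubotolkova_while.py | prime_kilometrs
-- ===== SOURCE A (Python) =====
-- def is_prime_number(number):
--     i=2
--     if number == 2:
--         return True
--     while i<number:
--         if number%i == 0:
--             return False
--         else:
--             i+=1
--     return True
--
-- def prime_kilometrs(km):
--     day = 0
--     distance = 0
--     number = 2
--     while distance<km:
--         if is_prime_number(number):
--             distance+= number
--             day+=1
--             number+=1
--         else:
--             number+=1
--     return day
-- ===== SOURCE B (Python) =====
-- def prime_kilometrs(km):
--     primes = []
--     day = 0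
--     distance = 0
--     candidate = 2
--     while distance < km:
--         if all(candidate % p != 0 for p in primes):
--             primes.append(candidate)
--             distance += candidate
--             day += 1
--         candidate += 1
--     return day
-- ===== Notes on version B (the rewrite author's own statement) =====
-- stated objective: faster
-- what changed: B keeps a growing table of the primes found so far and trial-divides each candidate only by those stored primes, instead of A's re-testing every candidate against all integers 2..n-1.
import Mathlib
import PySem

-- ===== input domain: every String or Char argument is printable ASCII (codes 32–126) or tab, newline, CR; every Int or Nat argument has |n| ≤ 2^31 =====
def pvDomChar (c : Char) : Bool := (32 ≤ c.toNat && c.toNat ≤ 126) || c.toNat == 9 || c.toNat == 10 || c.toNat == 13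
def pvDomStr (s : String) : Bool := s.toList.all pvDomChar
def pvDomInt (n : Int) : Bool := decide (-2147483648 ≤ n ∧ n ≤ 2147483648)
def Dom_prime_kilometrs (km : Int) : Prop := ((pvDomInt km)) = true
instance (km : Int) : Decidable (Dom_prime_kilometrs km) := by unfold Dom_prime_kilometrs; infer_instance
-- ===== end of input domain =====

-- B keeps a growing table of the primes found so far and trial-divides each candidate
-- only by those stored primes, instead of A's re-testing each candidate against all of 2..n-1 (objective: faster).

-- ===== PORT A =====

-- the `while i < number` loop of A's is_prime_number
def isPrimeAux (number i : Int) : Bool :=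
  if _h : i < number then
    if PySem.Int.mod number i == 0 then false else isPrimeAux number (i + 1)
  else true
termination_by (number - i).toNat
decreasing_by omega

def is_prime_number (number : Int) : Bool :=
  if number == 2 then true else isPrimeAux number 2

-- termination measure helper for the main while loop: distance to the next prime ≥ n
def pgap (n : Int) : Nat := Nat.find (Nat.exists_infinite_primes n.toNat) - n.toNat

-- (termination lemmas for the main-loop ports; cited in their decreasing_by)
theorem isPrimeAux_true_iff (number i : Int) :
    isPrimeAux number i = true ↔ ∀ j : Int, i ≤ j → j < number → ¬ j ∣ number := by
  fun_induction isPrimeAux number i with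
  | case1 i h hm =>
    simp only [Bool.false_eq_true, false_iff]
    push Not
    exact ⟨i, le_refl i, h, (PySem.Int.mod_eq_zero_iff_dvd number i).mp (by simpa using hm)⟩
  | case2 i h hm ih =>
    rw [ih]
    constructor
    · intro H j hj1 hj2 hd
      rcases eq_or_lt_of_le hj1 with rfl | hlt
      · exact hm (by simp [(PySem.Int.mod_eq_zero_iff_dvd _ _).mpr hd])
      · exact H j (by omega) hj2 hd
    · intro H j hj1 hj2 hd
      exact H j (by omega) hj2 hd
  | case3 i h =>
    simp only [true_iff]
    intro j hj1 hj2 hd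
    omega

theorem is_prime_iff (n : Int) (hn : 2 ≤ n) :
    is_prime_number n = true ↔ n.toNat.Prime := by
  unfold is_prime_number
  by_cases h2 : n = 2
  · subst h2; norm_num; decide
  · simp only [beq_iff_eq, h2, if_false, isPrimeAux_true_iff]
    rw [Nat.prime_def_lt]
    constructor
    · intro H
      refine ⟨by omega, fun m hm hd => ?_⟩
      by_contra hm1
      have hm0 : m ≠ 0 := by rintro rfl; simp at hd; omega
      have : (m : Int) ∣ n := by
        have := Int.natCast_dvd_natCast.mpr hd
        rwa [Int.toNat_of_nonneg (by omega)] at this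
      exact H (m : Int) (by omega) (by omega) this
    · rintro ⟨-, H⟩ j hj1 hj2 hd
      have hjd : j.toNat ∣ n.toNat := by
        apply Int.natCast_dvd_natCast.mp
        rwa [Int.toNat_of_nonneg (by omega), Int.toNat_of_nonneg (by omega)]
      have := H j.toNat (by omega) hjd
      omega

theorem pgap_succ_lt (n : Int) (hn : 2 ≤ n) (hnp : ¬ n.toNat.Prime) :
    pgap (n + 1) < pgap n := by
  unfold pgap
  have h1 := Nat.exists_infinite_primes n.toNat
  have h2 := Nat.exists_infinite_primes (n + 1).toNat
  have s1 := Nat.find_spec h1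
  have s2 := Nat.find_spec h2
  have hne : Nat.find h1 ≠ n.toNat := fun e => hnp (e ▸ s1.2)
  have hn1 : (n + 1).toNat = n.toNat + 1 := by omega
  have hle : Nat.find h2 ≤ Nat.find h1 := Nat.find_min' h2 ⟨by omega, s1.2⟩
  have hge : Nat.find h1 ≤ Nat.find h2 := Nat.find_min' h1 ⟨by omega, s2.2⟩
  omega

theorem not_prime_of_is_prime_false (n : Int) (hn : 2 ≤ n)
    (h : ¬ is_prime_number n = true) : ¬ n.toNat.Prime := fun hp => h ((is_prime_iff n hn).mpr hp)

-- the main `while distance < km` loop of A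
def pkLoopA (km day distance number : Int) (hn : 2 ≤ number) : Int :=
  if _hd : distance < km then
    if hp : is_prime_number number = true then
      pkLoopA km (day + 1) (distance + number) (number + 1) (by omega)
    else
      pkLoopA km day distance (number + 1) (by omega)
  else day
termination_by ((km - distance).toNat, pgap number)
decreasing_by
  · exact Prod.Lex.left _ _ (by omega)
  · exact Prod.Lex.right _ (pgap_succ_lt number hn (not_prime_of_is_prime_false number hn hp))

def prime_kilometrs (km : Int) : Int := pkLoopA km 0 0 2 (by norm_num)

-- ===== PORT B =====

-- loop invariant of B: `primes` holds exactly the primes below the current candidate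
def PInv (candidate : Int) (primes : List Int) : Prop :=
  ∀ p : Int, p ∈ primes ↔ 2 ≤ p ∧ p < candidate ∧ p.toNat.Prime

-- (invariant/termination lemmas for pkLoopB; cited in its body and decreasing_by)
theorem allcheck_iff (c : Int) (primes : List Int) (hc : 2 ≤ c) (hinv : PInv c primes) :
    primes.all (fun p => !(PySem.Int.mod c p == 0)) = true ↔ c.toNat.Prime := by
  rw [List.all_eq_true]
  constructor
  · intro H
    by_contra hnp
    obtain ⟨q, hq, hqd⟩ := Nat.exists_prime_and_dvd (n := c.toNat) (by omega)
    have hq2 := hq.two_le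
    have hqlt : q < c.toNat := lt_of_le_of_ne (Nat.le_of_dvd (by omega) hqd) (fun e => hnp (e ▸ hq))
    have hmem : (q : Int) ∈ primes := (hinv q).mpr ⟨by omega, by omega, by simpa using hq⟩
    have := H _ hmem
    simp only [Bool.not_eq_eq_eq_not, Bool.not_true, beq_eq_false_iff_ne] at this
    apply this
    rw [PySem.Int.mod_eq_zero_iff_dvd]
    have := Int.natCast_dvd_natCast.mpr hqd
    rwa [Int.toNat_of_nonneg (by omega)] at this
  · intro hp p hmem
    obtain ⟨hp2, hplt, hpp⟩ := (hinv p).mp hmem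
    simp only [Bool.not_eq_eq_eq_not, Bool.not_true, beq_eq_false_iff_ne]
    intro hmod
    have hd : p ∣ c := (PySem.Int.mod_eq_zero_iff_dvd c p).mp hmod
    have hdn : p.toNat ∣ c.toNat := by
      apply Int.natCast_dvd_natCast.mp
      rwa [Int.toNat_of_nonneg (by omega), Int.toNat_of_nonneg (by omega)]
    have := (hp.eq_one_or_self_of_dvd _ hdn)
    omega

theorem pinv_step_prime (c : Int) (primes : List Int) (hc : 2 ≤ c) (hinv : PInv c primes)
    (hp : c.toNat.Prime) : PInv (c + 1) (primes ++ [c]) := by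
  intro p
  simp only [List.mem_append, List.mem_singleton, hinv p]
  constructor
  · rintro (⟨h1, h2, h3⟩ | rfl)
    · exact ⟨h1, by omega, h3⟩
    · exact ⟨hc, by omega, hp⟩
  · rintro ⟨h1, h2, h3⟩
    by_cases hpc : p = c
    · exact Or.inr hpc
    · exact Or.inl ⟨h1, by omega, h3⟩

theorem pinv_step_notprime (c : Int) (primes : List Int) (hc : 2 ≤ c) (hinv : PInv c primes)
    (hp : ¬ c.toNat.Prime) : PInv (c + 1) primes := by
  intro p
  rw [hinv p]
  constructor
  · rintro ⟨h1, h2, h3⟩; exact ⟨h1, by omega, h3⟩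
  · rintro ⟨h1, h2, h3⟩
    refine ⟨h1, ?_, h3⟩
    rcases eq_or_lt_of_le (by omega : p ≤ c) with rfl | h
    · exact absurd h3 hp
    · exact h

-- the main `while distance < km` loop of B, carrying the growing prime table
def pkLoopB (km day distance candidate : Int) (primes : List Int)
    (hc : 2 ≤ candidate) (hinv : PInv candidate primes) : Int :=
  if _hd : distance < km then
    if hall : primes.all (fun p => !(PySem.Int.mod candidate p == 0)) = true then
      pkLoopB km (day + 1) (distance + candidate) (candidate + 1) (primes ++ [candidate])
        (by omega)
        (pinv_step_prime candidate primes hc hinv ((allcheck_iff candidate primes hc hinv).mp hall))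
    else
      pkLoopB km day distance (candidate + 1) primes (by omega)
        (pinv_step_notprime candidate primes hc hinv
          (fun hp => hall ((allcheck_iff candidate primes hc hinv).mpr hp)))
  else day
termination_by ((km - distance).toNat, pgap candidate)
decreasing_by
  · exact Prod.Lex.left _ _ (by omega)
  · exact Prod.Lex.right _ (pgap_succ_lt candidate hc
      (fun hp => hall ((allcheck_iff candidate primes hc hinv).mpr hp)))

theorem pinv_init : PInv 2 [] := by
  intro p
  simp only [List.not_mem_nil, false_iff]
  rintro ⟨h1, h2, -⟩; omega

def prime_kilometrs_alt (km : Int) : Int := pkLoopB km 0 0 2 [] (by norm_num) pinv_init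

-- ===== PRECONDITION & SPEC =====
def Spec_prime_kilometrs (km : Int) (out : Int) : Prop := out = prime_kilometrs_alt km
instance (km : Int) (out : Int) : Decidable (Spec_prime_kilometrs km out) := by unfold Spec_prime_kilometrs; infer_instance

-- ===== CLAIM (what is proved, stated in full; the proofs are below) =====
def Claim_equal_prime_kilometrs : Prop := ∀ (km : Int), Dom_prime_kilometrs km → Spec_prime_kilometrs km (prime_kilometrs km)

-- ===== LEMMAS AND PROOFS =====

theorem loops_agree (km day distance number : Int) (hn : 2 ≤ number) :
    ∀ (primes : List Int) (hinv : PInv number primes),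
      pkLoopA km day distance number hn = pkLoopB km day distance number primes hn hinv := by
  fun_induction pkLoopA km day distance number hn with
  | case1 day distance number hn hd hp ih =>
    intro primes hinv
    rw [pkLoopB]
    have hall : primes.all (fun p => !(PySem.Int.mod number p == 0)) = true :=
      (allcheck_iff number primes hn hinv).mpr ((is_prime_iff number hn).mp hp)
    rw [dif_pos hd, dif_pos hall]
    exact ih _ _
  | case2 day distance number hn hd hp ih =>
    intro primes hinv
    rw [pkLoopB]
    have hall : ¬ primes.all (fun p => !(PySem.Int.mod number p == 0)) = true :=
      fun h => hp ((is_prime_iff number hn).mpr ((allcheck_iff number primes hn hinv).mp h))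
    rw [dif_pos hd, dif_neg hall]
    exact ih _ _
  | case3 day distance number hn hd =>
    intro primes hinv
    rw [pkLoopB, dif_neg hd]

-- ===== VERDICT (by name: the statement is the Claim_ definition above) =====
theorem prime_kilometrs_spec : Claim_equal_prime_kilometrs := by
  intro km _
  unfold Spec_prime_kilometrs prime_kilometrs prime_kilometrs_alt
  exact loops_agree km 0 0 2 (by norm_num) [] pinv_init
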